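-- pv_equiv track=rewrite | github.com/yejinee/Algorithm | 2023/1522.py | solution
-- ===== SOURCE A (Python) =====
-- def solution(s):
--     # 1. 문자열 중 'a'의 갯수 구하기
--     a_cnt = 0
--     for alphabet in s:
--         if alphabet == 'a':
--             a_cnt += 1
--
--     # 2. a_cnt만큼 슬라이딩윈도우 수행
--     min_cnt = 1e9
--     for i in range(len(s)):
--         b_cnt = 0
--         for j in range(i, i+a_cnt):
--             test = s[j%len(s)]
--             if s[j%len(s)] == 'b':
--                 b_cnt += 1
--         min_cnt = min(min_cnt, b_cnt)
--
--     return min_cnt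
-- ===== SOURCE B (Python) =====
-- def solution(s):
--     # O(n) sliding window: keep the 'b'-count of the current circular window
--     # of size k = s.count('a') and update it in O(1) per shift.
--     n = len(s)
--     k = s.count('a')
--     cur = sum(1 for c in s[:k] if c == 'b')
--     best = cur
--     for i in range(1, n):
--         cur = cur + (s[(i + k - 1) % n] == 'b') - (s[i - 1] == 'b')
--         if cur < best:
--             best = cur
--     return best
-- ===== Notes on version B (the rewrite author's own statement) =====
-- stated objective: faster
-- what changed: Replaced the O(n*k) re-count of 'b's for every circular window start by a single O(n) sliding-window pass that updates the current window's b-count in O(1) per shift and tracks the running minimum.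
-- outside the precondition, e.g. on solution(''): A returns 1000000000.0, B returns 0
import Mathlib
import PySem

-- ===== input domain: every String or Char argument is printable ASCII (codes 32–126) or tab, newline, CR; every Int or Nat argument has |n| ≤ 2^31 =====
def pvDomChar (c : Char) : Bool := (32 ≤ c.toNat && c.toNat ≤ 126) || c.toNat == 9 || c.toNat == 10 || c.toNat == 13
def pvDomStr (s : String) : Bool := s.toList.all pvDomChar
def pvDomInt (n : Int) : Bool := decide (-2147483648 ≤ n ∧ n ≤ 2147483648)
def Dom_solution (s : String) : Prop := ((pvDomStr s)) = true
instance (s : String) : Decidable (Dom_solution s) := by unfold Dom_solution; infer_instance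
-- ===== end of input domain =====

-- B replaces A's per-start re-count of 'b's in each circular window by one O(n)
-- sliding-window pass (objective: faster, asymptotically).


-- ===== PORT A =====
-- literal transliteration of A; s[j % len(s)] never raises (0 < len under Pre_),
-- so the total indexing form pyGetD is exact there.
def solution (s : String) : Int :=
  let cs := s.toList
  let aCnt : Int := cs.foldl (fun acc c => if c == 'a' then acc + 1 else acc) 0
  let n : Int := PySem.List.len cs
  (PySem.List.pyRange 0 n 1).foldl
    (fun minCnt i =>
      let bCnt : Int := (PySem.List.pyRange i (i + aCnt) 1).foldl
        (fun b j => if PySem.List.pyGetD cs (PySem.Int.mod j n) ' ' = 'b' then b + 1 else b) 0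
      min minCnt bCnt)
    1000000000

-- ===== PORT B =====
-- transliteration of Source B: one sliding-window pass with accumulators (cur, best).
def solution_alt (s : String) : Int :=
  let cs := s.toList
  let n : Int := PySem.List.len cs
  let k : Int := (cs.count 'a' : Int)
  let cur0 : Int := (PySem.List.slice cs none (some k)).foldl
    (fun acc c => if c = 'b' then acc + 1 else acc) 0
  let r := (PySem.List.pyRange 1 n 1).foldl
    (fun (st : Int × Int) i =>
      let cur := st.1 + (if PySem.List.pyGetD cs (PySem.Int.mod (i + k - 1) n) ' ' = 'b' then 1 else 0)
                      - (if PySem.List.pyGetD cs (i - 1) ' ' = 'b' then 1 else 0)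
      (cur, if cur < st.2 then cur else st.2))
    (cur0, cur0)
  r.2

-- ===== PRECONDITION & SPEC =====
-- Pre_ excludes the empty string, on which A returns the float sentinel 1e9 (not an int),
-- and the strings holding at least 10^9 'a's AND at least 10^9 'b's — the only inputs on
-- which A's `min_cnt = 1e9` sentinel can survive and be returned as a float rather than
-- an int (and on which A's O(n*k) ≥ 10^18-step loop cannot feasibly be evaluated).
def Pre_solution (s : String) : Prop :=
  s.toList ≠ [] ∧ (s.toList.count 'a' < 1000000000 ∨ s.toList.count 'b' < 1000000000)
instance (s : String) : Decidable (Pre_solution s) := by unfold Pre_solution; infer_instance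
def pvWitness_solution : String := "abba"
def Spec_solution (s : String) (out : Int) : Prop := out = solution_alt s
instance (s : String) (out : Int) : Decidable (Spec_solution s out) := by unfold Spec_solution; infer_instance

-- ===== CLAIM (what is proved, stated in full; the proofs are below) =====
def Claim_equal_solution : Prop := ∀ (s : String), Dom_solution s → Pre_solution s → Spec_solution s (solution s)

-- ===== LEMMAS AND PROOFS =====

-- b-count of the circular window of size (count of 'a') starting at position m
def Wc (cs : List Char) (m : Nat) : Nat :=
  (List.range (cs.count 'a')).countP (fun t => decide (cs.getD ((m + t) % cs.length) ' ' = 'b'))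

lemma Wc_le_count_a (cs : List Char) (m : Nat) : Wc cs m ≤ cs.count 'a' := by
  unfold Wc
  calc (List.range (cs.count 'a')).countP _ ≤ (List.range (cs.count 'a')).length :=
        List.countP_le_length
    _ = cs.count 'a' := by simp

lemma Wc_succ (cs : List Char) (m : Nat) :
    (Wc cs (m + 1) : Int)
      = (Wc cs m : Int)
        + (if cs.getD ((m + cs.count 'a') % cs.length) ' ' = 'b' then 1 else 0)
        - (if cs.getD (m % cs.length) ' ' = 'b' then 1 else 0) := by
  have h1 : (List.range (cs.count 'a' + 1)).countP
        (fun t => decide (cs.getD ((m + t) % cs.length) ' ' = 'b'))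
      = Wc cs m + (if cs.getD ((m + cs.count 'a') % cs.length) ' ' = 'b' then 1 else 0) := by
    rw [List.range_succ, List.countP_append, Wc]
    simp [List.countP_cons]
  have h2 : (List.range (cs.count 'a' + 1)).countP
        (fun t => decide (cs.getD ((m + t) % cs.length) ' ' = 'b'))
      = (if cs.getD (m % cs.length) ' ' = 'b' then 1 else 0) + Wc cs (m + 1) := by
    rw [List.range_succ_eq_map, List.countP_cons, List.countP_map]
    have h3 : ((List.range (cs.count 'a')).countP
        ((fun t => decide (cs.getD ((m + t) % cs.length) ' ' = 'b')) ∘ Nat.succ)) = Wc cs (m + 1) := by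
      apply List.countP_congr
      intro t _
      simp only [Function.comp_apply]
      have he : m + Nat.succ t = m + 1 + t := by omega
      rw [he]
    rw [h3]
    simp only [Nat.add_zero, decide_eq_true_eq]
    split_ifs <;> omega
  have h4 := h1.symm.trans h2
  split_ifs at * <;> omega

-- take K as a map over range, K <= length
lemma take_count_eq_map (cs : List Char) :
    cs.take (cs.count 'a') = (List.range (cs.count 'a')).map (fun t => cs.getD t ' ') := by
  have hK : cs.count 'a' ≤ cs.length := List.count_le_length
  apply List.ext_getElem
  · simp [hK]
  · intro i h1 h2
    have hi : i < cs.length := by simp only [List.length_take] at h1; omega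
    simp [List.getD_eq_getElem?_getD, List.getElem?_eq_getElem hi]

lemma Wc0_eq_countP_range (cs : List Char) :
    Wc cs 0 = (List.range (cs.count 'a')).countP (fun t => decide (cs.getD t ' ' = 'b')) := by
  unfold Wc
  apply List.countP_congr
  intro t ht
  simp only [List.mem_range] at ht
  have he : (0 + t) % cs.length = t := by
    rw [Nat.zero_add, Nat.mod_eq_of_lt (lt_of_lt_of_le ht List.count_le_length)]
  rw [he]

lemma Wc0_le_count_b (cs : List Char) : Wc cs 0 ≤ cs.count 'b' := by
  have h : Wc cs 0 = (cs.take (cs.count 'a')).count 'b' := by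
    rw [Wc0_eq_countP_range, take_count_eq_map]
    simp only [List.count_eq_countP, List.countP_map]
    apply List.countP_congr
    intro t _
    simp
  rw [h]
  exact (List.take_sublist _ _).count_le 'b'

lemma cur0_eq_Wc0 (cs : List Char) :
    (PySem.List.slice cs none (some (cs.count 'a' : Int))).foldl
      (fun acc c => if c = 'b' then acc + 1 else acc) (0 : Int) = (Wc cs 0 : Int) := by
  rw [PySem.List.slice_to_natCast, PySem.List.foldl_ite_add_one (p := fun c => c = 'b'),
      take_count_eq_map, List.countP_map, Wc0_eq_countP_range]
  have hc : ((fun x => decide (x = 'b')) ∘ fun t => cs.getD t ' ')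
      = (fun t => decide (cs.getD t ' ' = 'b')) := rfl
  rw [hc]
  simp

lemma inner_eq_Wc (cs : List Char) (m : Nat) :
    (PySem.List.pyRange (m : Int) ((m : Int) + (cs.count 'a' : Int)) 1).foldl
      (fun b j => if PySem.List.pyGetD cs (PySem.Int.mod j ((cs.length : Int))) ' ' = 'b' then b + 1 else b) (0 : Int)
    = (Wc cs m : Int) := by
  rw [PySem.List.pyRange_one, List.foldl_map]
  have h1 : ((m : Int) + (cs.count 'a' : Int) - (m : Int)).toNat = cs.count 'a' := by omega
  rw [h1, PySem.List.foldl_ite_add_one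
        (p := fun (t : Nat) => PySem.List.pyGetD cs (PySem.Int.mod ((m : Int) + (t : Int)) ((cs.length : Int))) ' ' = 'b')]
  have h3 : (List.range (cs.count 'a')).countP
        (fun (t : Nat) => decide (PySem.List.pyGetD cs (PySem.Int.mod ((m : Int) + (t : Int)) ((cs.length : Int))) ' ' = 'b'))
      = (List.range (cs.count 'a')).countP
        (fun (t : Nat) => decide (cs.getD ((m + t) % cs.length) ' ' = 'b')) := by
    apply List.countP_congr
    intro t _
    have hc : ((m : Int) + (t : Int)) = (((m + t : Nat) : Int)) := by push_cast; ring
    rw [hc, PySem.Int.mod_natCast, PySem.List.pyGetD_natCast]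
  rw [h3]
  simp [Wc]

lemma Afold (cs : List Char) (hN : cs ≠ []) (hbig : (Wc cs 0 : Int) ≤ 1000000000) :
    (List.range cs.length).foldl (fun mc m => min mc (Wc cs m : Int)) 1000000000
    = (List.range (cs.length - 1)).foldl (fun mc t => min mc (Wc cs (t + 1) : Int)) (Wc cs 0 : Int) := by
  have h : cs.length = (cs.length - 1) + 1 := by
    have := List.length_pos_of_ne_nil hN; omega
  rw [h, List.range_succ_eq_map, List.foldl_cons, List.foldl_map, min_eq_right hbig]
  rfl

lemma Bfold (cs : List Char) (hN : cs ≠ []) (b0 : Int) :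
    ∀ j, j ≤ cs.length - 1 →
    (List.range j).foldl
      (fun (st : Int × Int) (t : Nat) =>
        (st.1 + (if PySem.List.pyGetD cs (PySem.Int.mod ((1:Int) + (t:Int) + (cs.count 'a' : Int) - 1) ((cs.length : Int))) ' ' = 'b' then 1 else 0) - (if PySem.List.pyGetD cs ((1:Int) + (t:Int) - 1) ' ' = 'b' then 1 else 0),
         if (st.1 + (if PySem.List.pyGetD cs (PySem.Int.mod ((1:Int) + (t:Int) + (cs.count 'a' : Int) - 1) ((cs.length : Int))) ' ' = 'b' then 1 else 0) - (if PySem.List.pyGetD cs ((1:Int) + (t:Int) - 1) ' ' = 'b' then 1 else 0)) < st.2 then st.1 + (if PySem.List.pyGetD cs (PySem.Int.mod ((1:Int) + (t:Int) + (cs.count 'a' : Int) - 1) ((cs.length : Int))) ' ' = 'b' then 1 else 0) - (if PySem.List.pyGetD cs ((1:Int) + (t:Int) - 1) ' ' = 'b' then 1 else 0) else st.2))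
      ((Wc cs 0 : Int), b0)
    = ((Wc cs j : Int), (List.range j).foldl (fun mc t => min mc (Wc cs (t + 1) : Int)) b0) := by
  intro j
  induction j with
  | zero => intro _; simp
  | succ j ih =>
    intro hj
    have hlen := List.length_pos_of_ne_nil hN
    rw [List.range_succ, List.foldl_append, List.foldl_append, ih (by omega)]
    simp only [List.foldl_cons, List.foldl_nil]
    have hidx1 : (1:Int) + (j:Int) + (cs.count 'a' : Int) - 1 = ((j + cs.count 'a' : Nat) : Int) := by
      push_cast; ring
    have hidx2 : (1:Int) + (j:Int) - 1 = ((j : Nat) : Int) := by omega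
    rw [hidx1, hidx2, PySem.Int.mod_natCast,
        PySem.List.pyGetD_natCast, PySem.List.pyGetD_natCast]
    have hjN : j < cs.length := by omega
    have hmod : cs.getD j ' ' = cs.getD (j % cs.length) ' ' := by
      rw [Nat.mod_eq_of_lt hjN]
    rw [hmod]
    have hcur : (Wc cs j : Int)
        + (if cs.getD ((j + cs.count 'a') % cs.length) ' ' = 'b' then 1 else 0)
        - (if cs.getD (j % cs.length) ' ' = 'b' then 1 else 0) = (Wc cs (j + 1) : Int) :=
      (Wc_succ cs j).symm
    rw [hcur]
    have hmin : (if (Wc cs (j + 1) : Int) < (List.range j).foldl (fun mc t => min mc (Wc cs (t + 1) : Int)) b0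
          then (Wc cs (j + 1) : Int)
          else (List.range j).foldl (fun mc t => min mc (Wc cs (t + 1) : Int)) b0)
        = min ((List.range j).foldl (fun mc t => min mc (Wc cs (t + 1) : Int)) b0) (Wc cs (j + 1) : Int) := by
      rw [min_def]; split_ifs <;> omega
    rw [hmin]

lemma hA_lem (s : String) :
    solution s = (List.range s.toList.length).foldl
      (fun mc m => min mc (Wc s.toList m : Int)) 1000000000 := by
  unfold solution
  simp only [PySem.List.foldl_beq_add_one, zero_add, PySem.List.len_eq]
  rw [PySem.List.pyRange_one, List.foldl_map]
  have ht : ((s.toList.length : Int) - 0).toNat = s.toList.length := by omega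
  rw [ht]
  apply PySem.List.foldl_congr_mem
  intro acc m _
  have h0 : (0:Int) + (m:Int) = (m:Int) := by omega
  rw [h0]
  exact congrArg (min acc) (inner_eq_Wc s.toList m)

lemma hB_lem (s : String) (hne : s.toList ≠ []) :
    solution_alt s = (List.range (s.toList.length - 1)).foldl
      (fun mc t => min mc (Wc s.toList (t + 1) : Int)) (Wc s.toList 0 : Int) := by
  unfold solution_alt
  simp only [PySem.List.len_eq]
  rw [cur0_eq_Wc0, PySem.List.pyRange_one, List.foldl_map]
  have ht : ((s.toList.length : Int) - 1).toNat = s.toList.length - 1 := by omega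
  rw [ht]
  exact congrArg Prod.snd (Bfold s.toList hne (Wc s.toList 0 : Int) (s.toList.length - 1) le_rfl)

-- ===== VERDICT (by name: the statement is the Claim_ definition above) =====
theorem solution_spec : Claim_equal_solution := by
  intro s _ hpre
  obtain ⟨hne, hsmall⟩ := hpre
  unfold Spec_solution
  rw [hA_lem, hB_lem s hne]
  apply Afold s.toList hne
  rcases hsmall with h | h
  · have h1 := Wc_le_count_a s.toList 0
    omega
  · have h1 := Wc0_le_count_b s.toList
    omega
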